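-- pv_equiv track=rewrite | github.com/XiaoyuYang-Jack/OctaMotif-ML | model/feature_engineering_workflow/template_rules.py | infer_unit_group
-- ===== SOURCE A (Python) =====
-- def infer_unit_group(family: str) -> str:
--     if family in {
--         "electronegativity_covalent_radius_ratio",
--         "electronegativity_covalent_radius_contrast_ratio",
--     }:
--         return "electronegativity_per_covalent_radius"
--     if family in {
--         "electronegativity_ionic_radius_ratio",
--         "electronegativity_ionic_radius_contrast_ratio",
--     }:
--         return "electronegativity_per_ionic_radius"
--     if family in {
--         "electronegativity_shannon_radius_ratio",
--         "electronegativity_shannon_radius_contrast_ratio",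
--     }:
--         return "electronegativity_per_shannon_radius"
--     if family.endswith("_contrast"):
--         if family.startswith("electronegativity"):
--             return "electronegativity"
--         if "radius" in family:
--             return "length_like"
--     if family.endswith("_ratio"):
--         return "dimensionless"
--     if "radius" in family or family in {"volume", "neighbor_distance"}:
--         return "length_like"
--     if family in {"bandgap", "ewald"}:
--         return "energy_like"
--     if "valence" in family or family == "unfilled":
--         return "electron_count"
--     if family == "electronegativity":
--         return "electronegativity"
--     if family == "density":
--         return "density"
--     if family == "packing_fraction":
--         return "dimensionless"
--     if family.startswith("local_difference:"):
--         return infer_unit_group(family.split(":", 1)[1])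
--     return "dimensionless"
-- ===== SOURCE B (Python) =====
-- # Table-driven re-implementation: one ordered rule table scanned by a generic
-- # matcher inside an explicit loop (prefix-stripping replaces A's recursion).
-- _PREFIX = "local_difference:"
--
-- _RULES = [
--     ((("exact", ("electronegativity_covalent_radius_ratio",
--                  "electronegativity_covalent_radius_contrast_ratio")),),
--      "electronegativity_per_covalent_radius"),
--     ((("exact", ("electronegativity_ionic_radius_ratio",
--                  "electronegativity_ionic_radius_contrast_ratio")),),
--      "electronegativity_per_ionic_radius"),
--     ((("exact", ("electronegativity_shannon_radius_ratio",
--                  "electronegativity_shannon_radius_contrast_ratio")),),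
--      "electronegativity_per_shannon_radius"),
--     ((("suffix", "_contrast"), ("prefix", "electronegativity")), "electronegativity"),
--     ((("suffix", "_contrast"), ("contains", "radius")), "length_like"),
--     ((("suffix", "_ratio"),), "dimensionless"),
--     ((("contains", "radius"),), "length_like"),
--     ((("exact", ("volume", "neighbor_distance")),), "length_like"),
--     ((("exact", ("bandgap", "ewald")),), "energy_like"),
--     ((("contains", "valence"),), "electron_count"),
--     ((("exact", ("unfilled",)),), "electron_count"),
--     ((("exact", ("electronegativity",)),), "electronegativity"),
--     ((("exact", ("density",)),), "density"),
--     ((("exact", ("packing_fraction",)),), "dimensionless"),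
-- ]
--
--
-- def _holds(family, cond):
--     kind, arg = cond
--     if kind == "exact":
--         return family in arg
--     if kind == "suffix":
--         return family.endswith(arg)
--     if kind == "prefix":
--         return family.startswith(arg)
--     return arg in family  # "contains"
--
--
-- def infer_unit_group(family: str) -> str:
--     while True:
--         for conds, label in _RULES:
--             if all(_holds(family, c) for c in conds):
--                 return label
--         if family.startswith(_PREFIX):
--             family = family[len(_PREFIX):]
--         else:
--             return "dimensionless"
-- ===== Notes on version B (the rewrite author's own statement) =====
-- stated objective: alternative
-- what changed: A's hard-coded if-cascade with tail recursion is replaced by an ordered rule table (exact/suffix/prefix/contains conditions) scanned by a generic matcher inside an explicit prefix-stripping loop.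
import Mathlib
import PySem

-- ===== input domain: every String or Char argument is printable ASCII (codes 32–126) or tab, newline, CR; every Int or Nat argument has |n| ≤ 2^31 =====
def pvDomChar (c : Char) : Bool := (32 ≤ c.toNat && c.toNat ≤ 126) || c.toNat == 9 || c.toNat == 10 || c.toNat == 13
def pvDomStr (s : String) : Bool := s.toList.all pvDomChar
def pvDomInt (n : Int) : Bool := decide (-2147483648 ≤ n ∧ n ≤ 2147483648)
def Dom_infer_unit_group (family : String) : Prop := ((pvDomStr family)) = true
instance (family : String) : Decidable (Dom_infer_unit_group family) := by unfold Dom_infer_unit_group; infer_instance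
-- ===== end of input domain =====

-- B re-implements A's if-cascade as one ordered rule table scanned by a generic matcher
-- inside an explicit prefix-stripping loop (objective: alternative decomposition, same cost).

-- ===== PORT A =====
-- helper lemmas needed only for the TERMINATION of port A's recursion
-- (A recurses on family.split(":", 1)[1] after a startswith("local_difference:") check).
lemma pvGoStepNe (fuel m : ℕ) (c : Char) (rest cur : List Char) (accs : List (List Char))
    (hm : m ≠ 0) (hc : c ≠ ':') :
    PySem.Chars.splitOnMax.go [':'] (fuel+1) m (c :: rest) cur accs =
    PySem.Chars.splitOnMax.go [':'] fuel m rest (c :: cur) accs := by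
  simp [PySem.Chars.splitOnMax.go, hm, List.isPrefixOf]
  intro h; exact absurd h.symm hc

lemma pvGoStepEq (fuel m : ℕ) (rest cur : List Char) (accs : List (List Char)) (hm : m ≠ 0) :
    PySem.Chars.splitOnMax.go [':'] (fuel+1) m (':' :: rest) cur accs =
    PySem.Chars.splitOnMax.go [':'] fuel (m-1) rest [] (cur.reverse :: accs) := by
  simp [PySem.Chars.splitOnMax.go, hm, List.isPrefixOf]

lemma pvGoZero (fuel : ℕ) (l cur : List Char) (accs : List (List Char)) :
    PySem.Chars.splitOnMax.go [':'] (fuel+1) 0 l cur accs = ((cur.reverse ++ l) :: accs).reverse := by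
  cases l <;> simp [PySem.Chars.splitOnMax.go]

lemma pvGoSkip (pre : List Char) (hp : ':' ∉ pre) : ∀ (k m : ℕ) (l cur : List Char)
    (accs : List (List Char)), m ≠ 0 →
    PySem.Chars.splitOnMax.go [':'] (pre.length + (k+1)) m (pre ++ l) cur accs =
    PySem.Chars.splitOnMax.go [':'] (k+1) m l (pre.reverse ++ cur) accs := by
  induction pre with
  | nil => intro k m l cur accs _; simp
  | cons c pre' ih =>
    intro k m l cur accs hm
    have hc : c ≠ ':' := fun h => hp (h ▸ List.mem_cons_self)
    have harith : (c :: pre').length + (k+1) = (pre'.length + (k+1)) + 1 := by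
      simp [List.length_cons]; omega
    rw [harith, List.cons_append, pvGoStepNe _ _ _ _ _ _ hm hc,
        ih (fun h => hp (List.mem_cons_of_mem _ h)) k m l (c :: cur) accs hm]
    simp

lemma pvSplitLocalDiff (t : List Char) :
    PySem.Chars.splitOnMax ("local_difference:".toList ++ t) [':'] 1 =
    ["local_difference".toList, t] := by
  have htl : "local_difference:".toList = "local_difference".toList ++ [':'] := by decide
  rw [htl]
  show PySem.Chars.splitOnMax ("local_difference".toList ++ ([':'] ++ t)) [':'] 1 = _
  rw [← List.append_assoc]
  unfold PySem.Chars.splitOnMax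
  have hlen : (("local_difference".toList ++ [':']) ++ t).length + 1 =
      "local_difference".toList.length + ((t.length + 1) + 1) := by simp; omega
  rw [if_neg (by norm_num), hlen]
  show PySem.Chars.splitOnMax.go [':'] _ 1 _ [] [] = _
  rw [List.append_assoc,
      pvGoSkip "local_difference".toList (by decide) (t.length + 1) 1 ([':'] ++ t) [] []
        (by norm_num)]
  rw [List.singleton_append, pvGoStepEq (t.length+1) 1 t _ [] (by norm_num)]
  rw [pvGoZero]
  simp

lemma pvStripShorter {fam rest : List Char}
    (h : PySem.Chars.startswith fam "local_difference:".toList = true)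
    (h2 : PySem.List.pyGet? (PySem.Chars.splitOnMax fam [':'] 1) 1 = some rest) :
    rest.length < fam.length := by
  obtain ⟨t, ht⟩ := (PySem.Chars.startswith_iff _ _).mp h
  subst ht
  rw [pvSplitLocalDiff] at h2
  have : rest = t := by
    simpa [PySem.List.pyGet?, PySem.List.pyIdx?] using h2.symm
  subst this
  have h17 : ("local_difference:".toList).length = 17 := by decide
  simp only [List.length_append, h17]
  omega

-- literal transliteration of A's ordered cascade (recursion on the stripped prefix)
def pvInferA (fam : List Char) : String :=
  if fam = "electronegativity_covalent_radius_ratio".toList ∨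
     fam = "electronegativity_covalent_radius_contrast_ratio".toList then
    "electronegativity_per_covalent_radius"
  else if fam = "electronegativity_ionic_radius_ratio".toList ∨
          fam = "electronegativity_ionic_radius_contrast_ratio".toList then
    "electronegativity_per_ionic_radius"
  else if fam = "electronegativity_shannon_radius_ratio".toList ∨
          fam = "electronegativity_shannon_radius_contrast_ratio".toList then
    "electronegativity_per_shannon_radius"
  -- the nested 'if endswith: if startswith / if radius' block falls through, hence two guards
  else if PySem.Chars.endswith fam "_contrast".toList ∧
          PySem.Chars.startswith fam "electronegativity".toList then
    "electronegativity"
  else if PySem.Chars.endswith fam "_contrast".toList ∧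
          PySem.Chars.isIn "radius".toList fam then
    "length_like"
  else if PySem.Chars.endswith fam "_ratio".toList then
    "dimensionless"
  else if PySem.Chars.isIn "radius".toList fam ∨ fam = "volume".toList ∨
          fam = "neighbor_distance".toList then
    "length_like"
  else if fam = "bandgap".toList ∨ fam = "ewald".toList then
    "energy_like"
  else if PySem.Chars.isIn "valence".toList fam ∨ fam = "unfilled".toList then
    "electron_count"
  else if fam = "electronegativity".toList then
    "electronegativity"
  else if fam = "density".toList then
    "density"
  else if fam = "packing_fraction".toList then
    "dimensionless"
  else if h : PySem.Chars.startswith fam "local_difference:".toList then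
    -- family.split(":", 1)[1]; the none arm is unreachable (split under the prefix has 2 parts)
    match h2 : PySem.List.pyGet? (PySem.Chars.splitOnMax fam [':'] 1) 1 with
    | some rest => pvInferA rest
    | none => "dimensionless"
  else
    "dimensionless"
termination_by fam.length
decreasing_by exact pvStripShorter h h2

def infer_unit_group (family : String) : String := pvInferA family.toList

-- ===== PORT B =====
inductive PvCond where
  | exact : List (List Char) → PvCond
  | suffix : List Char → PvCond
  | pref : List Char → PvCond
  | contains : List Char → PvCond

def pvHolds (fam : List Char) : PvCond → Bool
  | .exact ss => ss.any (fun s => fam == s)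
  | .suffix s => PySem.Chars.endswith fam s
  | .pref s => PySem.Chars.startswith fam s
  | .contains s => PySem.Chars.isIn s fam

def pvRules : List (List PvCond × String) :=
  [ ([.exact ["electronegativity_covalent_radius_ratio".toList,
              "electronegativity_covalent_radius_contrast_ratio".toList]],
     "electronegativity_per_covalent_radius"),
    ([.exact ["electronegativity_ionic_radius_ratio".toList,
              "electronegativity_ionic_radius_contrast_ratio".toList]],
     "electronegativity_per_ionic_radius"),
    ([.exact ["electronegativity_shannon_radius_ratio".toList,
              "electronegativity_shannon_radius_contrast_ratio".toList]],
     "electronegativity_per_shannon_radius"),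
    ([.suffix "_contrast".toList, .pref "electronegativity".toList], "electronegativity"),
    ([.suffix "_contrast".toList, .contains "radius".toList], "length_like"),
    ([.suffix "_ratio".toList], "dimensionless"),
    ([.contains "radius".toList], "length_like"),
    ([.exact ["volume".toList, "neighbor_distance".toList]], "length_like"),
    ([.exact ["bandgap".toList, "ewald".toList]], "energy_like"),
    ([.contains "valence".toList], "electron_count"),
    ([.exact ["unfilled".toList]], "electron_count"),
    ([.exact ["electronegativity".toList]], "electronegativity"),
    ([.exact ["density".toList]], "density"),
    ([.exact ["packing_fraction".toList]], "dimensionless") ]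

-- the while-True loop: scan the table; on no match strip the prefix and loop, else stop
def pvInferB (fam : List Char) : String :=
  match pvRules.find? (fun r => r.1.all (pvHolds fam)) with
  | some r => r.2
  | none =>
    if h : PySem.Chars.startswith fam "local_difference:".toList then
      pvInferB (fam.drop "local_difference:".toList.length)  -- family[len(_PREFIX):]
    else
      "dimensionless"
termination_by fam.length
decreasing_by
  obtain ⟨t, ht⟩ := (PySem.Chars.startswith_iff _ _).mp h
  subst ht
  have h17 : ("local_difference:".toList).length = 17 := by decide
  simp only [List.length_append, List.length_drop, h17]
  omega

def infer_unit_group_alt (family : String) : String := pvInferB family.toList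

-- ===== PRECONDITION & SPEC =====
def Spec_infer_unit_group (family : String) (out : String) : Prop := out = infer_unit_group_alt family
instance (family : String) (out : String) : Decidable (Spec_infer_unit_group family out) := by unfold Spec_infer_unit_group; infer_instance

-- ===== CLAIM (what is proved, stated in full; the proofs are below) =====
def Claim_equal_infer_unit_group : Prop := ∀ (family : String), Dom_infer_unit_group family → Spec_infer_unit_group family (infer_unit_group family)

-- ===== LEMMAS AND PROOFS =====
lemma pvMain : ∀ (n : ℕ) (fam : List Char), fam.length < n → pvInferA fam = pvInferB fam := by
  intro n
  induction n with
  | zero => intro fam hlen; omega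
  | succ n ih =>
    intro fam hlen
    rw [pvInferA.eq_def, pvInferB.eq_def, pvRules]
    by_cases h1 : fam = "electronegativity_covalent_radius_ratio".toList ∨
        fam = "electronegativity_covalent_radius_contrast_ratio".toList
    · rw [if_pos h1, List.find?_cons_of_pos (by simp only [List.all_cons, List.all_nil, pvHolds, List.any_cons, List.any_nil, Bool.and_true, Bool.or_false, Bool.or_eq_true, Bool.and_eq_true, beq_iff_eq]; exact h1)]
    · rw [if_neg h1, List.find?_cons_of_neg (by simp only [List.all_cons, List.all_nil, pvHolds, List.any_cons, List.any_nil, Bool.and_true, Bool.or_false, Bool.or_eq_true, Bool.and_eq_true, beq_iff_eq]; exact h1)]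
      by_cases h2 : fam = "electronegativity_ionic_radius_ratio".toList ∨
          fam = "electronegativity_ionic_radius_contrast_ratio".toList
      · rw [if_pos h2, List.find?_cons_of_pos (by simp only [List.all_cons, List.all_nil, pvHolds, List.any_cons, List.any_nil, Bool.and_true, Bool.or_false, Bool.or_eq_true, Bool.and_eq_true, beq_iff_eq]; exact h2)]
      · rw [if_neg h2, List.find?_cons_of_neg (by simp only [List.all_cons, List.all_nil, pvHolds, List.any_cons, List.any_nil, Bool.and_true, Bool.or_false, Bool.or_eq_true, Bool.and_eq_true, beq_iff_eq]; exact h2)]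
        by_cases h3 : fam = "electronegativity_shannon_radius_ratio".toList ∨
            fam = "electronegativity_shannon_radius_contrast_ratio".toList
        · rw [if_pos h3, List.find?_cons_of_pos (by simp only [List.all_cons, List.all_nil, pvHolds, List.any_cons, List.any_nil, Bool.and_true, Bool.or_false, Bool.or_eq_true, Bool.and_eq_true, beq_iff_eq]; exact h3)]
        · rw [if_neg h3, List.find?_cons_of_neg (by simp only [List.all_cons, List.all_nil, pvHolds, List.any_cons, List.any_nil, Bool.and_true, Bool.or_false, Bool.or_eq_true, Bool.and_eq_true, beq_iff_eq]; exact h3)]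
          by_cases h4 : PySem.Chars.endswith fam "_contrast".toList = true ∧
              PySem.Chars.startswith fam "electronegativity".toList = true
          · rw [if_pos h4, List.find?_cons_of_pos (by simp only [List.all_cons, List.all_nil, pvHolds, List.any_cons, List.any_nil, Bool.and_true, Bool.or_false, Bool.or_eq_true, Bool.and_eq_true, beq_iff_eq]; exact h4)]
          · rw [if_neg h4, List.find?_cons_of_neg (by simp only [List.all_cons, List.all_nil, pvHolds, List.any_cons, List.any_nil, Bool.and_true, Bool.or_false, Bool.or_eq_true, Bool.and_eq_true, beq_iff_eq]; exact h4)]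
            by_cases h5 : PySem.Chars.endswith fam "_contrast".toList = true ∧
                PySem.Chars.isIn "radius".toList fam = true
            · rw [if_pos h5, List.find?_cons_of_pos (by simp only [List.all_cons, List.all_nil, pvHolds, List.any_cons, List.any_nil, Bool.and_true, Bool.or_false, Bool.or_eq_true, Bool.and_eq_true, beq_iff_eq]; exact h5)]
            · rw [if_neg h5, List.find?_cons_of_neg (by simp only [List.all_cons, List.all_nil, pvHolds, List.any_cons, List.any_nil, Bool.and_true, Bool.or_false, Bool.or_eq_true, Bool.and_eq_true, beq_iff_eq]; exact h5)]
              by_cases h6 : PySem.Chars.endswith fam "_ratio".toList = true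
              · rw [if_pos h6, List.find?_cons_of_pos (by simp only [List.all_cons, List.all_nil, pvHolds, List.any_cons, List.any_nil, Bool.and_true, Bool.or_false, Bool.or_eq_true, Bool.and_eq_true, beq_iff_eq]; exact h6)]
              · rw [if_neg h6, List.find?_cons_of_neg (by simp only [List.all_cons, List.all_nil, pvHolds, List.any_cons, List.any_nil, Bool.and_true, Bool.or_false, Bool.or_eq_true, Bool.and_eq_true, beq_iff_eq]; exact h6)]
                by_cases h7 : PySem.Chars.isIn "radius".toList fam = true ∨
                    fam = "volume".toList ∨ fam = "neighbor_distance".toList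
                · rw [if_pos h7]
                  by_cases h7a : PySem.Chars.isIn "radius".toList fam = true
                  · rw [List.find?_cons_of_pos (by simp only [List.all_cons, List.all_nil, pvHolds, List.any_cons, List.any_nil, Bool.and_true, Bool.or_false, Bool.or_eq_true, Bool.and_eq_true, beq_iff_eq]; exact h7a)]
                  · rw [List.find?_cons_of_neg (by simp only [List.all_cons, List.all_nil, pvHolds, List.any_cons, List.any_nil, Bool.and_true, Bool.or_false, Bool.or_eq_true, Bool.and_eq_true, beq_iff_eq]; exact h7a),
                        List.find?_cons_of_pos (by simp only [List.all_cons, List.all_nil, pvHolds, List.any_cons, List.any_nil, Bool.and_true, Bool.or_false, Bool.or_eq_true, Bool.and_eq_true, beq_iff_eq]; exact h7.resolve_left h7a)]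
                · rw [if_neg h7,
                      List.find?_cons_of_neg (by simp only [List.all_cons, List.all_nil, pvHolds, List.any_cons, List.any_nil, Bool.and_true, Bool.or_false, Bool.or_eq_true, Bool.and_eq_true, beq_iff_eq]; exact fun hh => h7 (Or.inl hh)),
                      List.find?_cons_of_neg (by simp only [List.all_cons, List.all_nil, pvHolds, List.any_cons, List.any_nil, Bool.and_true, Bool.or_false, Bool.or_eq_true, Bool.and_eq_true, beq_iff_eq]; exact fun hh => h7 (Or.inr hh))]
                  by_cases h8 : fam = "bandgap".toList ∨ fam = "ewald".toList
                  · rw [if_pos h8, List.find?_cons_of_pos (by simp only [List.all_cons, List.all_nil, pvHolds, List.any_cons, List.any_nil, Bool.and_true, Bool.or_false, Bool.or_eq_true, Bool.and_eq_true, beq_iff_eq]; exact h8)]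
                  · rw [if_neg h8, List.find?_cons_of_neg (by simp only [List.all_cons, List.all_nil, pvHolds, List.any_cons, List.any_nil, Bool.and_true, Bool.or_false, Bool.or_eq_true, Bool.and_eq_true, beq_iff_eq]; exact h8)]
                    by_cases h9 : PySem.Chars.isIn "valence".toList fam = true ∨
                        fam = "unfilled".toList
                    · rw [if_pos h9]
                      by_cases h9a : PySem.Chars.isIn "valence".toList fam = true
                      · rw [List.find?_cons_of_pos (by simp only [List.all_cons, List.all_nil, pvHolds, List.any_cons, List.any_nil, Bool.and_true, Bool.or_false, Bool.or_eq_true, Bool.and_eq_true, beq_iff_eq]; exact h9a)]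
                      · rw [List.find?_cons_of_neg (by simp only [List.all_cons, List.all_nil, pvHolds, List.any_cons, List.any_nil, Bool.and_true, Bool.or_false, Bool.or_eq_true, Bool.and_eq_true, beq_iff_eq]; exact h9a),
                            List.find?_cons_of_pos (by simp only [List.all_cons, List.all_nil, pvHolds, List.any_cons, List.any_nil, Bool.and_true, Bool.or_false, Bool.or_eq_true, Bool.and_eq_true, beq_iff_eq]; exact h9.resolve_left h9a)]
                    · rw [if_neg h9,
                          List.find?_cons_of_neg (by simp only [List.all_cons, List.all_nil, pvHolds, List.any_cons, List.any_nil, Bool.and_true, Bool.or_false, Bool.or_eq_true, Bool.and_eq_true, beq_iff_eq]; exact fun hh => h9 (Or.inl hh)),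
                          List.find?_cons_of_neg (by simp only [List.all_cons, List.all_nil, pvHolds, List.any_cons, List.any_nil, Bool.and_true, Bool.or_false, Bool.or_eq_true, Bool.and_eq_true, beq_iff_eq]; exact fun hh => h9 (Or.inr hh))]
                      by_cases h10 : fam = "electronegativity".toList
                      · rw [if_pos h10, List.find?_cons_of_pos (by simp only [List.all_cons, List.all_nil, pvHolds, List.any_cons, List.any_nil, Bool.and_true, Bool.or_false, Bool.or_eq_true, Bool.and_eq_true, beq_iff_eq]; exact h10)]
                      · rw [if_neg h10, List.find?_cons_of_neg (by simp only [List.all_cons, List.all_nil, pvHolds, List.any_cons, List.any_nil, Bool.and_true, Bool.or_false, Bool.or_eq_true, Bool.and_eq_true, beq_iff_eq]; exact h10)]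
                        by_cases h11 : fam = "density".toList
                        · rw [if_pos h11, List.find?_cons_of_pos (by simp only [List.all_cons, List.all_nil, pvHolds, List.any_cons, List.any_nil, Bool.and_true, Bool.or_false, Bool.or_eq_true, Bool.and_eq_true, beq_iff_eq]; exact h11)]
                        · rw [if_neg h11, List.find?_cons_of_neg (by simp only [List.all_cons, List.all_nil, pvHolds, List.any_cons, List.any_nil, Bool.and_true, Bool.or_false, Bool.or_eq_true, Bool.and_eq_true, beq_iff_eq]; exact h11)]
                          by_cases h12 : fam = "packing_fraction".toList
                          · rw [if_pos h12, List.find?_cons_of_pos (by simp only [List.all_cons, List.all_nil, pvHolds, List.any_cons, List.any_nil, Bool.and_true, Bool.or_false, Bool.or_eq_true, Bool.and_eq_true, beq_iff_eq]; exact h12)]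
                          · rw [if_neg h12, List.find?_cons_of_neg (by simp only [List.all_cons, List.all_nil, pvHolds, List.any_cons, List.any_nil, Bool.and_true, Bool.or_false, Bool.or_eq_true, Bool.and_eq_true, beq_iff_eq]; exact h12)]
                            by_cases h13 : PySem.Chars.startswith fam "local_difference:".toList = true
                            · rw [dif_pos h13, dif_pos h13]
                              obtain ⟨t, ht⟩ := (PySem.Chars.startswith_iff _ _).mp h13
                              subst ht
                              have hsplit : PySem.List.pyGet?
                                  (PySem.Chars.splitOnMax ("local_difference:".toList ++ t) [':'] 1) 1 = some t := by
                                rw [pvSplitLocalDiff]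
                                simp [PySem.List.pyGet?, PySem.List.pyIdx?]
                              have hdrop : List.drop "local_difference:".toList.length
                                  ("local_difference:".toList ++ t) = t := by simp
                              have hlt : t.length < n := by
                                have h17 : ("local_difference:".toList).length = 17 := by decide
                                rw [List.length_append, h17] at hlen
                                omega
                              split
                              case _ rest h2' =>
                                rw [hsplit] at h2'
                                cases h2'
                                rw [hdrop]
                                exact ih _ hlt
                              case _ h2' =>
                                rw [hsplit] at h2'
                                cases h2'
                            · rw [dif_neg h13, dif_neg h13]
                              rfl

-- ===== VERDICT (by name: the statement is the Claim_ definition above) =====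
theorem infer_unit_group_spec : Claim_equal_infer_unit_group := by
  intro family _
  unfold Spec_infer_unit_group infer_unit_group infer_unit_group_alt
  exact pvMain (family.toList.length+1) family.toList (by omega)
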